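-- pv_equiv track=rewrite | github.com/imagepbl/image-materials | imagematerials/reporting/reporting.py | _with_rollups
-- ===== SOURCE A (Python) =====
-- from typing import Dict, List, Tuple
--
-- def _dedup_lists(d: Dict[str, List[str]]) -> Dict[str, List[str]]:
--     return {k: sorted(set(v)) for k, v in d.items()}
--
-- def _with_rollups(mapping: Dict[str, List[str]], allowed_parents: set[str] | None = None) -> Dict[str, List[str]]:
--     out = {k: list(v) for k, v in mapping.items()}
--     # for each key, split into parts and create parent keys
--     for k, labels in mapping.items():
--         parts = k.split("|")
--         # iterate over parent levels
--         for i in range(1, len(parts)):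
--             parent = "|".join(parts[:i])
--             # skip if not in allowed parents
--             if allowed_parents and parent not in allowed_parents:
--                 continue
--             out.setdefault(parent, []).extend(labels)
--     return _dedup_lists(out)
-- ===== SOURCE B (Python) =====
-- # B: gather instead of scatter -- collect the allowed parent nodes once, then build each
-- # output entry directly as sorted(set(own labels + labels gathered from descendant keys)),
-- # instead of mutating a dict by scattering every key's labels into each parent prefix.
-- def _with_rollups(mapping, allowed_parents=None):
--     def ancestors(k):
--         parts = k.split("|")
--         return ["|".join(parts[:i]) for i in range(1, len(parts))]
--
--     def ok(p):
--         return not allowed_parents or p in allowed_parents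
--
--     parents = {}  # insertion-ordered set of parent nodes that pass the filter
--     for k in mapping:
--         for p in ancestors(k):
--             if ok(p):
--                 parents.setdefault(p)
--
--     def subtree(p):
--         return [lab for k, labs in mapping.items() if p in ancestors(k) for lab in labs]
--
--     out = {}
--     for k, labs in mapping.items():
--         extra = subtree(k) if k in parents else []
--         out[k] = sorted(set(list(labs) + extra))
--     for p in parents:
--         if p not in out:
--             out[p] = sorted(set(subtree(p)))
--     return out
-- ===== Notes on version B (the rewrite author's own statement) =====
-- stated objective: alternative
-- what changed: B gathers instead of scatters: it first collects the insertion-ordered set of parent prefixes passing the filter, then builds each output entry directly as the sorted de-duplicated union of the key's own labels and the labels of its descendant keys, instead of A's in-place dict mutation that extends every allowed parent prefix while scanning each key.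
import Mathlib
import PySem

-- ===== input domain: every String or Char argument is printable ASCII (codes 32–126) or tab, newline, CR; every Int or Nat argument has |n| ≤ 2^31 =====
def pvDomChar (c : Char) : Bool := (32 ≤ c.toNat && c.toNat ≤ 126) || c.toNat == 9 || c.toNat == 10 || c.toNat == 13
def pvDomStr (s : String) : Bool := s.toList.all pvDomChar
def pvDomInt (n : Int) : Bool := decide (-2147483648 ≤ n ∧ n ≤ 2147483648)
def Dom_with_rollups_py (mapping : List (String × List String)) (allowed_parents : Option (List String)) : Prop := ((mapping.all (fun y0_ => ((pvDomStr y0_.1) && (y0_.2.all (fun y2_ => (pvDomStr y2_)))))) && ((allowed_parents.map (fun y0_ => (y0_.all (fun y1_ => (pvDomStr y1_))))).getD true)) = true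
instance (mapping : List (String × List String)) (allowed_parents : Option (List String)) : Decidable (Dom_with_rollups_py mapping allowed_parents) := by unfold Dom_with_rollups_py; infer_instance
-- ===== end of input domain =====

-- B gathers descendant labels per node (two-phase direct construction) instead of A's
-- in-place dict scatter; same return value on every input (alternative, not faster).


-- ===== PORT A =====
-- `k.split("|")`: the separator is the nonempty literal "|", so `split?` is always `some`.
def with_rollups_py (mapping : List (String × List String)) (allowed_parents : Option (List String)) : List (String × List String) :=
  -- out = {k: list(v) for k, v in mapping.items()}  (the dict the Python sees is Dict.ofList mapping)
  let out0 : PySem.Dict String (List String) := PySem.Dict.ofList mapping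
  -- for k, labels in mapping.items(): for i in range(1, len(parts)): ...
  let out := (PySem.Dict.ofList mapping).items.foldl (fun out kv =>
    let parts := (PySem.Str.split? kv.1 "|").getD []
    (PySem.List.pyRange 1 (PySem.List.len parts) 1).foldl (fun out i =>
      let parent := PySem.Str.join "|" (PySem.List.slice parts none (some i))
      -- if allowed_parents and parent not in allowed_parents: continue
      let skip : Bool := match allowed_parents with
        | none => false
        | some aps => !aps.isEmpty && !(aps.contains parent)
      if skip then out
      -- out.setdefault(parent, []).extend(labels)  ≡  out[parent] = out.get(parent, []) + labels
      else out.modify parent [] (fun v => v ++ kv.2)) out) out0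
  -- _dedup_lists: {k: sorted(set(v)) for k, v in out.items()}
  out.items.map (fun p => (p.1, PySem.List.sorted (PySem.Set.ofList p.2) (fun x => x)))

-- ===== PORT B =====
-- ancestors(k) = ["|".join(parts[:i]) for i in range(1, len(parts))]
def pvAncestors (k : String) : List String :=
  let parts := (PySem.Str.split? k "|").getD []
  (PySem.List.pyRange 1 (PySem.List.len parts) 1).map
    (fun i => PySem.Str.join "|" (PySem.List.slice parts none (some i)))

def with_rollups_py_alt (mapping : List (String × List String)) (allowed_parents : Option (List String)) : List (String × List String) :=
  let items := (PySem.Dict.ofList mapping).items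
  -- ok(p) = not allowed_parents or p in allowed_parents
  let ok : String → Bool := fun p => match allowed_parents with
    | none => true
    | some aps => aps.isEmpty || aps.contains p
  -- parents = {}; for k in mapping: for p in ancestors(k): if ok(p): parents.setdefault(p)
  let parents : PySem.Set String := items.foldl (fun ps kv =>
    (pvAncestors kv.1).foldl (fun ps p => if ok p then PySem.Set.add ps p else ps) ps) []
  -- subtree(p) = [lab for k, labs in mapping.items() if p in ancestors(k) for lab in labs]
  let subtree : String → List String := fun p =>
    items.flatMap (fun kv => if (pvAncestors kv.1).contains p then kv.2 else [])
  -- for k, labs in mapping.items(): out[k] = sorted(set(list(labs) + extra))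
  let out0 := items.foldl (fun d kv =>
    let extra := if PySem.Set.contains parents kv.1 then subtree kv.1 else []
    d.insert kv.1 (PySem.List.sorted (PySem.Set.ofList (kv.2 ++ extra)) (fun x => x))) PySem.Dict.empty
  -- for p in parents: if p not in out: out[p] = sorted(set(subtree(p)))
  let out := parents.foldl (fun d p =>
    if d.contains p then d
    else d.insert p (PySem.List.sorted (PySem.Set.ofList (subtree p)) (fun x => x))) out0
  out.items

-- ===== PRECONDITION & SPEC =====
def Spec_with_rollups_py (mapping : List (String × List String)) (allowed_parents : Option (List String)) (out : List (String × List String)) : Prop := out = with_rollups_py_alt mapping allowed_parents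
instance (mapping : List (String × List String)) (allowed_parents : Option (List String)) (out : List (String × List String)) : Decidable (Spec_with_rollups_py mapping allowed_parents out) := by unfold Spec_with_rollups_py; infer_instance

-- ===== CLAIM (what is proved, stated in full; the proofs are below) =====
def Claim_equal_with_rollups_py : Prop := ∀ (mapping : List (String × List String)) (allowed_parents : Option (List String)), Dom_with_rollups_py mapping allowed_parents → Spec_with_rollups_py mapping allowed_parents (with_rollups_py mapping allowed_parents)

-- ===== LEMMAS AND PROOFS =====

-- getD of a scatter loop that appends `e.2` at key `e.1` for every event
theorem pv_getD_scatter (E : List (String × List String)) (d : PySem.Dict String (List String)) (c : String) :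
    (E.foldl (fun d e => d.modify e.1 [] (fun v => v ++ e.2)) d).getD c []
      = d.getD c [] ++ (E.filter (fun e => e.1 == c)).flatMap (fun e => e.2) := by
  induction E generalizing d with
  | nil => simp
  | cons e E ih =>
      simp only [List.foldl_cons, ih, List.filter_cons]
      by_cases h : e.1 = c
      · subst h; simp
      · simp [PySem.Dict.getD_modify, h, Ne.symm h]

-- a guarded-insert loop over distinct fresh-or-present keys appends exactly the missing ones
theorem pv_items_guarded_insert (g : String → List String) (ps : List String)
    (hnd : ps.Nodup) (d : PySem.Dict String (List String)) :
    (ps.foldl (fun d p => if d.contains p then d else d.insert p (g p)) d).items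
      = d.items ++ (ps.filter (fun p => !(d.contains p))).map (fun p => (p, g p)) := by
  induction ps generalizing d with
  | nil => simp
  | cons p ps ih =>
      have hnd' : ps.Nodup := hnd.of_cons
      have hp : p ∉ ps := (List.nodup_cons.mp hnd).1
      simp only [List.foldl_cons, List.filter_cons]
      by_cases h : d.contains p
      · simp [h, ih hnd']
      · have h' : d.contains p = false := by simp [h]
        simp only [h', Bool.false_eq_true, if_false, Bool.not_false, if_pos]
        rw [ih hnd']
        rw [PySem.Dict.items_insert_of_not_contains d (g p) h']
        have hf : ps.filter (fun q => !((d.insert p (g p)).contains q))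
            = ps.filter (fun q => !(d.contains q)) := by
          apply List.filter_congr
          intro q hq
          have : (q == p) = false := by
            simp only [beq_eq_false_iff_ne, ne_eq]
            intro hqp; exact hp (hqp ▸ hq)
          simp [PySem.Dict.contains_insert, this]
        rw [hf]
        simp [List.map_cons]

-- an add-loop splits into the old set plus the ordered-deduped new elements
theorem pv_foldl_add_eq_append (xs s : List String) :
    xs.foldl PySem.Set.add s
      = s ++ (xs.foldl PySem.Set.add []).filter (fun x => !(s.contains x)) := by
  induction xs generalizing s with
  | nil => simp
  | cons x xs ih =>
      simp only [List.foldl_cons]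
      have haddnil : PySem.Set.add [] x = [x] := by
        simp [PySem.Set.add, PySem.Set.contains]
      rw [haddnil, ih (PySem.Set.add s x), ih [x]]
      by_cases h : x ∈ s
      · have hadd : PySem.Set.add s x = s := by
          simp [PySem.Set.add, PySem.Set.contains, h]
        rw [hadd]
        simp only [List.filter_append, List.filter_cons, List.filter_filter,
          List.contains_eq_mem, h, decide_true, Bool.not_true, Bool.false_eq_true, if_false]
        congr 1
        apply List.filter_congr
        intro y _
        by_cases hyx : y = x
        · subst hyx; simp [h]
        · simp [hyx]
      · have hadd : PySem.Set.add s x = s ++ [x] := by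
          simp [PySem.Set.add, PySem.Set.contains, h]
        rw [hadd]
        simp only [List.filter_append, List.filter_cons, List.filter_filter,
          List.contains_eq_mem, h, decide_false, Bool.not_false, if_true, List.append_assoc]
        congr 2
        apply List.filter_congr
        intro y _
        by_cases hyx : y = x
        · subst hyx; simp
        · simp [hyx]

-- the filtered add-loop is Set.ofList of the filtered list
theorem pv_fold_add_filter (ok : String → Bool) (l : List String) :
    l.foldl (fun ps p => if ok p then PySem.Set.add ps p else ps) []
      = PySem.Set.ofList (l.filter ok) := by
  rw [PySem.Set.ofList_eq_foldl, ← List.foldl_filter]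

-- sorted(set(xs)) depends only on membership
theorem pv_sortedSet_congr (l1 l2 : List String) (h : ∀ x, x ∈ l1 ↔ x ∈ l2) :
    PySem.List.sorted (PySem.Set.ofList l1) (fun x => x)
      = PySem.List.sorted (PySem.Set.ofList l2) (fun x => x) := by
  apply PySem.List.sorted_eq_sorted_of_perm _ _ _ (fun a b h => h)
  rw [List.perm_ext_iff_of_nodup (PySem.Set.nodup_ofList l1) (PySem.Set.nodup_ofList l2)]
  intro a; rw [PySem.Set.mem_ofList, PySem.Set.mem_ofList]; exact h a

-- proof-side abbreviations
def pvDedupVal (v : List String) : List String := PySem.List.sorted (PySem.Set.ofList v) (fun x => x)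
def pvDedup (p : String × List String) : String × List String := (p.1, pvDedupVal p.2)
def pvOk (ap : Option (List String)) : String → Bool := fun p => match ap with
  | none => true
  | some aps => aps.isEmpty || aps.contains p
def pvPs (m : List (String × List String)) (ok : String → Bool) (anc : String → List String) : List String :=
  (m.flatMap (fun kv => anc kv.1)).filter ok
def pvEvents (m : List (String × List String)) (ok : String → Bool) (anc : String → List String) : List (String × List String) :=
  m.flatMap (fun kv => ((anc kv.1).filter ok).map (fun p => (p, kv.2)))
def pvSub (m : List (String × List String)) (anc : String → List String) (c : String) : List String :=
  m.flatMap (fun kv => if (anc kv.1).contains c then kv.2 else [])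

-- the generic scatter/gather equivalence, abstract in the filter `ok` and prefix list `anc`
theorem pv_main (m : List (String × List String)) (ok : String → Bool) (anc : String → List String)
    (hnd : (m.map Prod.fst).Nodup) :
    ((m.foldl (fun d kv =>
        (anc kv.1).foldl (fun d p => if ok p then d.modify p [] (fun v => v ++ kv.2) else d) d)
        (PySem.Dict.mk m)).items).map pvDedup
    =
    ((m.foldl (fun ps kv =>
        (anc kv.1).foldl (fun ps p => if ok p then PySem.Set.add ps p else ps) ps) ([] : List String)).foldl
      (fun d p => if d.contains p then d else d.insert p (pvDedupVal (pvSub m anc p)))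
      (m.foldl (fun d kv =>
        d.insert kv.1 (pvDedupVal (kv.2 ++ (if PySem.Set.contains
            (m.foldl (fun ps kv => (anc kv.1).foldl (fun ps p => if ok p then PySem.Set.add ps p else ps) ps) ([] : List String)) kv.1
          then pvSub m anc kv.1 else []))))
        PySem.Dict.empty)).items := by
  -- A-side: flatten the nested scatter loop into one loop over (parent, labels) events
  have hA1 : (m.foldl (fun d kv =>
        (anc kv.1).foldl (fun d p => if ok p then d.modify p [] (fun v => v ++ kv.2) else d) d)
        (PySem.Dict.mk m))
      = (pvEvents m ok anc).foldl (fun d e => d.modify e.1 [] (fun v => v ++ e.2)) (PySem.Dict.mk m) := by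
    rw [pvEvents, List.foldl_flatMap]
    simp only [List.foldl_map, List.foldl_filter]
  have hEfst : (pvEvents m ok anc).map Prod.fst = pvPs m ok anc := by
    simp only [pvEvents, pvPs, List.map_flatMap, List.map_map, List.filter_flatMap]
    simp [Function.comp_def]
  have hkeys1 : ((pvEvents m ok anc).foldl (fun d e => d.modify e.1 [] (fun v => v ++ e.2)) (PySem.Dict.mk m)).keys
      = PySem.Set.update (PySem.Dict.mk m).keys ((pvEvents m ok anc).map Prod.fst) :=
    PySem.Dict.keys_foldl_modify_key (pvEvents m ok anc) Prod.fst [] (fun _ e v => v ++ e.2) (PySem.Dict.mk m)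
  have hkeys : ((pvEvents m ok anc).foldl (fun d e => d.modify e.1 [] (fun v => v ++ e.2)) (PySem.Dict.mk m)).keys
      = m.map Prod.fst ++ (PySem.Set.ofList (pvPs m ok anc)).filter (fun x => !((m.map Prod.fst).contains x)) := by
    rw [hkeys1, hEfst]
    have hupd : PySem.Set.update (PySem.Dict.mk m).keys (pvPs m ok anc)
        = (pvPs m ok anc).foldl PySem.Set.add (m.map Prod.fst) := rfl
    rw [hupd, pv_foldl_add_eq_append, ← PySem.Set.ofList_eq_foldl]
  have hnodupA : ((pvEvents m ok anc).foldl (fun d e => d.modify e.1 [] (fun v => v ++ e.2)) (PySem.Dict.mk m)).keys.Nodup :=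
    PySem.Dict.nodup_keys_foldl_modify_key (pvEvents m ok anc) Prod.fst [] (fun _ e v => v ++ e.2) (PySem.Dict.mk m) hnd
  have hitems : ((pvEvents m ok anc).foldl (fun d e => d.modify e.1 [] (fun v => v ++ e.2)) (PySem.Dict.mk m)).items
      = (((pvEvents m ok anc).foldl (fun d e => d.modify e.1 [] (fun v => v ++ e.2)) (PySem.Dict.mk m)).keys).map
          (fun k => (k, ((pvEvents m ok anc).foldl (fun d e => d.modify e.1 [] (fun v => v ++ e.2)) (PySem.Dict.mk m)).getD k [])) :=
    PySem.Dict.items_eq_map_keys _ hnodupA []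
  have hgetD : ∀ c, ((pvEvents m ok anc).foldl (fun d e => d.modify e.1 [] (fun v => v ++ e.2)) (PySem.Dict.mk m)).getD c []
      = (PySem.Dict.mk m).getD c [] ++ ((pvEvents m ok anc).filter (fun e => e.1 == c)).flatMap (fun e => e.2) :=
    fun c => pv_getD_scatter _ _ c
  -- membership characterisations
  have hmemSub : ∀ (c x : String), x ∈ pvSub m anc c ↔ ∃ kv ∈ m, c ∈ anc kv.1 ∧ x ∈ kv.2 := by
    intro c x
    simp only [pvSub, List.mem_flatMap]
    constructor
    · rintro ⟨kv, hkv, hx⟩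
      by_cases hc : (anc kv.1).contains c
      · exact ⟨kv, hkv, List.contains_iff_mem.mp hc, by rwa [if_pos hc] at hx⟩
      · rw [if_neg hc] at hx; exact absurd hx (List.not_mem_nil)
    · rintro ⟨kv, hkv, hc, hx⟩
      exact ⟨kv, hkv, by rw [if_pos (List.contains_iff_mem.mpr hc)]; exact hx⟩
  have hmemE : ∀ (c x : String),
      (x ∈ ((pvEvents m ok anc).filter (fun e => e.1 == c)).flatMap (fun e => e.2))
        ↔ (ok c = true ∧ x ∈ pvSub m anc c) := by
    intro c x
    rw [hmemSub]
    simp only [pvEvents, List.mem_flatMap, List.mem_filter, List.mem_map, beq_iff_eq]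
    constructor
    · rintro ⟨e, ⟨⟨kv, hkv, p, hp, rfl⟩, hc⟩, hx⟩
      obtain rfl : p = c := hc
      exact ⟨hp.2, kv, hkv, hp.1, hx⟩
    · rintro ⟨hok, kv, hkv, hc, hx⟩
      exact ⟨(c, kv.2), ⟨⟨kv, hkv, c, ⟨hc, hok⟩, rfl⟩, rfl⟩, hx⟩
  have hPsOk : ∀ p ∈ pvPs m ok anc, ok p = true := fun p hp => (List.mem_filter.mp hp).2
  have hmemPs : ∀ c, (∃ kv ∈ m, c ∈ anc kv.1) → ok c = true → c ∈ pvPs m ok anc := by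
    rintro c ⟨kv, hkv, hc⟩ hok
    exact List.mem_filter.mpr ⟨List.mem_flatMap.mpr ⟨kv, hkv, hc⟩, hok⟩
  -- B-side: the parents loop is Set.ofList of the filtered prefix list
  have hpar : (m.foldl (fun ps kv =>
        (anc kv.1).foldl (fun ps p => if ok p then PySem.Set.add ps p else ps) ps) ([] : List String))
      = PySem.Set.ofList (pvPs m ok anc) := by
    rw [← List.foldl_flatMap, pv_fold_add_filter]
    rfl
  -- the first B loop inserts fresh distinct keys
  have hout0 : (m.foldl (fun d kv =>
        d.insert kv.1 (pvDedupVal (kv.2 ++ (if PySem.Set.contains (PySem.Set.ofList (pvPs m ok anc)) kv.1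
          then pvSub m anc kv.1 else [])))) PySem.Dict.empty).items
      = m.map (fun kv => (kv.1, pvDedupVal (kv.2 ++ (if PySem.Set.contains (PySem.Set.ofList (pvPs m ok anc)) kv.1
          then pvSub m anc kv.1 else [])))) := by
    have h := PySem.Dict.items_foldl_insert_fresh m Prod.fst
      (fun kv => pvDedupVal (kv.2 ++ (if PySem.Set.contains (PySem.Set.ofList (pvPs m ok anc)) kv.1
          then pvSub m anc kv.1 else []))) PySem.Dict.empty
      (fun a _ => PySem.Dict.contains_empty a.1) hnd
    simpa using h
  have hcont : ∀ q : String, (m.foldl (fun d kv =>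
        d.insert kv.1 (pvDedupVal (kv.2 ++ (if PySem.Set.contains (PySem.Set.ofList (pvPs m ok anc)) kv.1
          then pvSub m anc kv.1 else [])))) PySem.Dict.empty).contains q
      = (m.map Prod.fst).contains q := by
    intro q
    rw [Bool.eq_iff_iff, PySem.Dict.contains_iff_mem_keys, List.contains_iff_mem]
    show q ∈ (PySem.Dict.items _).map (fun x => x.1) ↔ _
    rw [hout0, List.map_map]
    simp [Function.comp_def]
  -- assemble
  rw [hA1, hitems, hpar,
    pv_items_guarded_insert (fun p => pvDedupVal (pvSub m anc p)) (PySem.Set.ofList (pvPs m ok anc))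
      (PySem.Set.nodup_ofList _), hout0, List.map_map, hkeys, List.map_append]
  have hfilter : (PySem.Set.ofList (pvPs m ok anc)).filter (fun p => !((m.foldl (fun d kv =>
        d.insert kv.1 (pvDedupVal (kv.2 ++ (if PySem.Set.contains (PySem.Set.ofList (pvPs m ok anc)) kv.1
          then pvSub m anc kv.1 else [])))) PySem.Dict.empty).contains p))
      = (PySem.Set.ofList (pvPs m ok anc)).filter (fun x => !((m.map Prod.fst).contains x)) :=
    List.filter_congr (fun p _ => by rw [hcont p])
  rw [hfilter]
  congr 1
  -- first segment: the original keys
  · rw [List.map_map]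
    apply List.map_congr_left
    intro kv hkv
    have hown : (PySem.Dict.mk m).getD kv.1 [] = kv.2 :=
      PySem.Dict.getD_of_mem_items (PySem.Dict.mk m) (by rw [Prod.mk.eta]; exact hkv) hnd []
    simp only [Function.comp_def, pvDedup]
    rw [hgetD kv.1, hown]
    by_cases hc : kv.1 ∈ pvPs m ok anc
    · have hc' : PySem.Set.contains (PySem.Set.ofList (pvPs m ok anc)) kv.1 = true :=
        List.contains_iff_mem.mpr ((PySem.Set.mem_ofList _ _).mpr hc)
      rw [if_pos hc']
      congr 1
      apply pv_sortedSet_congr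
      intro x
      rw [List.mem_append, List.mem_append, hmemE kv.1 x, hPsOk kv.1 hc]
      simp
    · have hc' : ¬ (PySem.Set.contains (PySem.Set.ofList (pvPs m ok anc)) kv.1 = true) := by
        intro h
        exact hc ((PySem.Set.mem_ofList _ _).mp (List.contains_iff_mem.mp h))
      rw [if_neg hc']
      congr 1
      apply pv_sortedSet_congr
      intro x
      rw [List.mem_append, List.mem_append, hmemE kv.1 x]
      constructor
      · rintro (hx | ⟨hok, hx⟩)
        · exact Or.inl hx
        · obtain ⟨kv2, hkv2, hc2, -⟩ := (hmemSub kv.1 x).mp hx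
          exact absurd (hmemPs kv.1 ⟨kv2, hkv2, hc2⟩ hok) hc
      · rintro (hx | hx)
        · exact Or.inl hx
        · exact absurd hx (List.not_mem_nil)
  -- second segment: the fresh parent keys
  · apply List.map_congr_left
    intro p hp
    rw [List.mem_filter] at hp
    have hpPs : p ∈ pvPs m ok anc := (PySem.Set.mem_ofList _ _).mp hp.1
    have hpK : ¬ p ∈ m.map Prod.fst := by
      intro h
      rw [List.contains_iff_mem.mpr h] at hp
      exact absurd hp.2 (by simp)
    simp only [Function.comp_def, pvDedup]
    have hng : (PySem.Dict.mk m).contains p = false := by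
      rw [Bool.eq_false_iff]
      intro h
      exact hpK (PySem.Dict.contains_iff_mem_keys (PySem.Dict.mk m) p |>.mp h)
    rw [hgetD p, PySem.Dict.getD_of_not_contains _ _ hng, List.nil_append]
    congr 1
    apply pv_sortedSet_congr
    intro x
    rw [hmemE p x]
    simp [hPsOk p hpPs]

-- ===== VERDICT (by name: the statement is the Claim_ definition above) =====
theorem with_rollups_py_spec : Claim_equal_with_rollups_py := by
  intro mapping ap _
  show with_rollups_py mapping ap = with_rollups_py_alt mapping ap
  have hnd : (((PySem.Dict.ofList mapping).items).map Prod.fst).Nodup :=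
    PySem.Dict.nodup_keys_ofList mapping
  have hA : with_rollups_py mapping ap
      = (((PySem.Dict.ofList mapping).items.foldl (fun d kv =>
          (pvAncestors kv.1).foldl
            (fun d p => if pvOk ap p then d.modify p [] (fun v => v ++ kv.2) else d) d)
          (PySem.Dict.mk (PySem.Dict.ofList mapping).items)).items).map pvDedup := by
    unfold with_rollups_py
    refine congrArg (fun d : PySem.Dict String (List String) => d.items.map pvDedup) ?_
    refine congrArg (fun f => List.foldl f (PySem.Dict.ofList mapping) (PySem.Dict.ofList mapping).items) ?_
    funext d kv
    rw [pvAncestors]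
    simp only [List.foldl_map]
    refine congrArg (fun g => List.foldl g d (PySem.List.pyRange 1 (PySem.List.len ((PySem.Str.split? kv.1 "|").getD [])) 1)) ?_
    funext d' i
    cases ap with
    | none => rfl
    | some aps =>
        by_cases h1 : aps.isEmpty = true
        · simp [pvOk, h1]
        · by_cases h2 : PySem.Str.join "|" (PySem.List.slice ((PySem.Str.split? kv.1 "|").getD []) none (some i)) ∈ aps <;>
            simp [pvOk, h1, h2]
  have h := pv_main ((PySem.Dict.ofList mapping).items) (pvOk ap) pvAncestors hnd
  exact hA.trans (h.trans rfl)
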